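-- pv_equiv track=rewrite | github.com/marchwashere/ds-psr-scripts | Lucky Egg chart generator.py | getLE
-- ===== SOURCE A (Python) =====
-- def rngAdvance(prev):
-- 	next=(1103515245*prev)+24691
-- 	return next%0x100000000
--
-- def rngOf(seed,frame):
-- 	prev=seed
-- 	for x in range(0,frame):
-- 		prev=rngAdvance(prev)
-- 	return prev
--
-- def checkItem(rng):
--     rng = rngAdvance(rng)
--     rng = rngAdvance(rng)
--     rnd = rng>>16
--     nat = rnd//0xa3e
--     PIDFound = False
--     while PIDFound == False:
--         rng=rngAdvance(rng)
--
--         lowerPID = rng>>16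
--         rng=rngAdvance(rng)
--
--         upperPID=rng>>16
--         PID=upperPID*0x10000+lowerPID
--         if PID%25 == nat:
--            PIDFound = True
--
--     rng = rngAdvance(rng)
--     rng = rngAdvance(rng)
--     rng = rngAdvance(rng)
--     item_deter = rng>>16
--     item_deter = item_deter%100
--     parts = [45,95,100]
--     for x in range(0,3):
--         if item_deter<parts[x]:
--             item = x
--             break
--     return item
--
-- def getLandSlot(rng):
--     parts=[20, 40, 50, 60, 70, 80, 85, 90, 94, 98, 99, 100]
--     rng = rng >> 16
--     sel = rng//656
--     for x in range(0,12):
--         if sel<parts[x]: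
--             return x
--
-- def getLE(seed,start,end):
--     target = [9,11]
--     lst = []
--     found = False
--     rng = rngOf(seed,start)
--     for x in range(start,end):
--         slot = getLandSlot(rngAdvance(rng))
--         if slot not in target:
--             rng = rngAdvance(rng)
--             continue
--         else:
--             res=checkItem(rng)
--             rng = rngAdvance(rng)
--             if res == 2:
--                 lst.append(x)
--     return lst
-- ===== SOURCE B (Python) =====
-- M = 1 << 32
-- A0 = 1103515245
-- C0 = 24691
--
--
-- def _adv(r):
--     return (A0 * r + C0) % M
--
--
-- def _seed_state(seed, n):
--     # state after n LCG steps from seed, by binary powering of the affine map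
--     a, c = 1, 0
--     sa, sc = A0, C0
--     while n > 0:
--         if n & 1:
--             a, c = (sa * a) % M, (sa * c + sc) % M
--         sa, sc = (sa * sa) % M, (sa * sc + sc) % M
--         n >>= 1
--     return (a * seed + c) % M
--
--
-- def _is_rare(rng):
--     # does the item determination starting at this state land on the rare slot (index 2)?
--     r = _adv(_adv(rng))
--     nat = (r >> 16) // 0xA3E
--     while True:
--         r = _adv(r)
--         lo = r >> 16
--         r = _adv(r)
--         hi = r >> 16
--         if (hi * 0x10000 + lo) % 25 == nat:
--             break
--     r = _adv(_adv(_adv(r)))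
--     return (r >> 16) % 100 >= 95
--
--
-- def getLE(seed, start, end):
--     out = []
--     rng = _seed_state(seed, max(start, 0))
--     for x in range(start, end):
--         nxt = _adv(rng)
--         sel = (nxt >> 16) // 656
--         if sel >= 94 and sel != 98 and _is_rare(rng):
--             out.append(x)
--         rng = nxt
--     return out
-- ===== Notes on version B (the rewrite author's own statement) =====
-- stated objective: faster
-- what changed: B seeds the generator with O(log start) binary powering of the LCG's affine map instead of rngOf's start-fold loop, and replaces the getLandSlot table scan and checkItem's parts loop with direct threshold arithmetic on the raw selector values.
import Mathlib
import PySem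

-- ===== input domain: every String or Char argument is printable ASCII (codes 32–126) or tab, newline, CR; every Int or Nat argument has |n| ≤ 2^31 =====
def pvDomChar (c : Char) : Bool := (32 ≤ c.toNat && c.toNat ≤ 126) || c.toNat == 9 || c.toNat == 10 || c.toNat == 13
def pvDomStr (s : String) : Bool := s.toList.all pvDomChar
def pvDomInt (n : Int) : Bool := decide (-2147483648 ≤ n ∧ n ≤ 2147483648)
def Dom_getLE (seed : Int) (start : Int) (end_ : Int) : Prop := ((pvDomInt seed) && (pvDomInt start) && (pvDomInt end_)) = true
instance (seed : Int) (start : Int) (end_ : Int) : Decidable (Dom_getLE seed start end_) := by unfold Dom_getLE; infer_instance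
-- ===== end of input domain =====

-- B replaces the O(start) linear LCG seeding rngOf with O(log start) binary powering of the
-- affine map, and replaces the two table-scan helpers (getLandSlot, checkItem's parts loop)
-- with direct threshold arithmetic; objective: faster (asymptotic in start).
-- Python's '%'/'//'/'>>16' on a POSITIVE modulus/divisor coincide with Lean's Int '%'/'/'
-- (Euclidean = floored for positive divisor), used throughout both ports; '>> 16' is ported
-- as '/ 65536' (exact: Python's right shift floors). checkItem's 'while' loop has no bound in
-- Python; both ports run it with the same large fuel (none/false if exhausted — unreachable
-- in the tested input space).

-- ===== PORT A =====
def rngAdvance (prev : Int) : Int := (1103515245 * prev + 24691) % 4294967296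

def rngOf (seed : Int) (frame : Int) : Int :=
  (PySem.List.pyRange 0 frame 1).foldl (fun prev _ => rngAdvance prev) seed

def pvPidFuel : Nat := 8589934592

-- checkItem's 'while PIDFound == False' loop, fuel-bounded; returns the rng after the break
def checkItemLoop : Nat → Int → Int → Option Int
  | 0, _, _ => none
  | fuel+1, rng, nat =>
    let rng1 := rngAdvance rng
    let lowerPID := rng1 / 65536
    let rng2 := rngAdvance rng1
    let upperPID := rng2 / 65536
    let PID := upperPID * 65536 + lowerPID
    if PID % 25 = nat then some rng2 else checkItemLoop fuel rng2 nat

-- the final 'for x in range(0,3)' over parts = [45,95,100] is unrolled (same comparisons, same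
-- order); none = Python's 'item' left unassigned (NameError), unreachable since item_deter < 100
def checkItem (rng0 : Int) : Option Int :=
  let rng := rngAdvance (rngAdvance rng0)
  let rnd := rng / 65536
  let nat := rnd / 2622
  match checkItemLoop pvPidFuel rng nat with
  | none => none
  | some rngP =>
    let rng3 := rngAdvance (rngAdvance (rngAdvance rngP))
    let item_deter := (rng3 / 65536) % 100
    if item_deter < 45 then some 0
    else if item_deter < 95 then some 1
    else if item_deter < 100 then some 2
    else none

-- the 'for x in range(0,12)' over parts unrolled likewise; none = Python's implicit None
def getLandSlot (rng : Int) : Option Int :=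
  let sel := (rng / 65536) / 656
  if sel < 20 then some 0 else if sel < 40 then some 1 else if sel < 50 then some 2
  else if sel < 60 then some 3 else if sel < 70 then some 4 else if sel < 80 then some 5
  else if sel < 85 then some 6 else if sel < 90 then some 7 else if sel < 94 then some 8
  else if sel < 98 then some 9 else if sel < 99 then some 10 else if sel < 100 then some 11
  else none

-- the main 'for x in range(start,end)' loop; 'slot not in target' for target = [9,11]
def getLELoop : List Int → Int → List Int → List Int
  | [], _, lst => lst
  | x :: xs, rng, lst =>
    let slot := getLandSlot (rngAdvance rng)
    if ¬ (slot = some 9 ∨ slot = some 11) then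
      getLELoop xs (rngAdvance rng) lst
    else
      let res := checkItem rng
      let rng' := rngAdvance rng
      if res = some 2 then getLELoop xs rng' (lst ++ [x]) else getLELoop xs rng' lst

def getLE (seed : Int) (start : Int) (end_ : Int) : List Int :=
  getLELoop (PySem.List.pyRange start end_ 1) (rngOf seed start) []

-- ===== PORT B =====
def altAdv (r : Int) : Int := (1103515245 * r + 24691) % 4294967296

-- _seed_state's 'while n > 0' binary-powering loop; n >>= 1 becomes recursion on n / 2
def altAffLoop (n : Nat) (a c sa sc : Int) : Int × Int :=
  if n = 0 then (a, c)
  else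
    let p := if n % 2 = 1 then ((sa * a) % 4294967296, (sa * c + sc) % 4294967296) else (a, c)
    altAffLoop (n / 2) p.1 p.2 ((sa * sa) % 4294967296) ((sa * sc + sc) % 4294967296)
  termination_by n
  decreasing_by omega

-- max(start, 0) iterations: (max n 0).toNat
def altSeedState (seed : Int) (n : Int) : Int :=
  let p := altAffLoop (max n 0).toNat 1 0 1103515245 24691
  (p.1 * seed + p.2) % 4294967296

-- _is_rare's 'while True' PID-search loop, fuel-bounded with the same fuel as port A
def altPidLoop : Nat → Int → Int → Option Int
  | 0, _, _ => none
  | fuel+1, r, nat =>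
    let r1 := altAdv r
    let lo := r1 / 65536
    let r2 := altAdv r1
    let hi := r2 / 65536
    if (hi * 65536 + lo) % 25 = nat then some r2 else altPidLoop fuel r2 nat

def altIsRare (rng : Int) : Bool :=
  let r := altAdv (altAdv rng)
  let nat := (r / 65536) / 2622
  match altPidLoop pvPidFuel r nat with
  | none => false
  | some rP =>
    let r3 := altAdv (altAdv (altAdv rP))
    decide (95 ≤ (r3 / 65536) % 100)

def altLoop : List Int → Int → List Int → List Int
  | [], _, out => out
  | x :: xs, rng, out =>
    let nxt := altAdv rng
    let sel := (nxt / 65536) / 656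
    let out' := if 94 ≤ sel ∧ sel ≠ 98 ∧ altIsRare rng then out ++ [x] else out
    altLoop xs nxt out'

def getLE_alt (seed : Int) (start : Int) (end_ : Int) : List Int :=
  altLoop (PySem.List.pyRange start end_ 1) (altSeedState seed start) []

-- ===== PRECONDITION & SPEC =====
def Spec_getLE (seed : Int) (start : Int) (end_ : Int) (out : List Int) : Prop := out = getLE_alt seed start end_
instance (seed : Int) (start : Int) (end_ : Int) (out : List Int) : Decidable (Spec_getLE seed start end_ out) := by unfold Spec_getLE; infer_instance

-- ===== CLAIM (what is proved, stated in full; the proofs are below) =====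
def Claim_equal_getLE : Prop := ∀ (seed : Int) (start : Int) (end_ : Int), Dom_getLE seed start end_ → Spec_getLE seed start end_ (getLE seed start end_)

-- ===== LEMMAS AND PROOFS =====

theorem altAdv_eq : altAdv = rngAdvance := rfl

theorem adv_nonneg (r : Int) : 0 ≤ rngAdvance r :=
  Int.emod_nonneg _ (by norm_num)

theorem adv_lt (r : Int) : rngAdvance r < 4294967296 :=
  Int.emod_lt_of_pos _ (by norm_num)

-- advancing only looks at the state mod 2^32
theorem adv_emod (r : Int) : rngAdvance (r % 4294967296) = rngAdvance r := by
  unfold rngAdvance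
  have h : r % 4294967296 ≡ r [ZMOD 4294967296] := Int.emod_emod_of_dvd r dvd_rfl
  exact (h.mul_left 1103515245).add_right 24691

theorem adv_self_emod (r : Int) : rngAdvance r % 4294967296 = rngAdvance r :=
  Int.emod_emod_of_dvd _ dvd_rfl

theorem altIsRare_emod (r : Int) : altIsRare (r % 4294967296) = altIsRare r := by
  unfold altIsRare; rw [altAdv_eq, adv_emod]

theorem altPidLoop_eq_checkItemLoop (fuel : Nat) : ∀ r nat, altPidLoop fuel r nat = checkItemLoop fuel r nat := by
  induction fuel with
  | zero => intro r nat; rfl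
  | succ f ih =>
    intro r nat
    simp only [altPidLoop, checkItemLoop, altAdv_eq]
    split
    · rfl
    · exact ih _ _

-- after the PID loop, A picks item 2 exactly when B's threshold test fires
theorem post_rare (ro : Option Int) :
    ((match ro with
      | none => (none : Option Int)
      | some rngP =>
        let rng3 := rngAdvance (rngAdvance (rngAdvance rngP))
        let item_deter := (rng3 / 65536) % 100
        if item_deter < 45 then some 0
        else if item_deter < 95 then some 1
        else if item_deter < 100 then some 2
        else none) = some 2)
    ↔ ((match ro with
      | none => false
      | some rP =>
        let r3 := rngAdvance (rngAdvance (rngAdvance rP))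
        decide (95 ≤ (r3 / 65536) % 100)) = true) := by
  cases ro with
  | none => simp
  | some rP =>
    have h0 : 0 ≤ (rngAdvance (rngAdvance (rngAdvance rP)) / 65536) % 100 := Int.emod_nonneg _ (by norm_num)
    have h1 : (rngAdvance (rngAdvance (rngAdvance rP)) / 65536) % 100 < 100 := Int.emod_lt_of_pos _ (by norm_num)
    dsimp only
    split_ifs <;> simp <;> omega

-- checkItem returns item 2 exactly when _is_rare is true
theorem checkItem_rare (r : Int) : (checkItem r = some 2) ↔ (altIsRare r = true) := by
  unfold checkItem altIsRare
  simp only [altAdv_eq, altPidLoop_eq_checkItemLoop]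
  exact post_rare _

-- the land-slot membership test of A equals B's threshold test, for states in [0, 2^32)
set_option maxHeartbeats 1000000 in
theorem landslot_iff (v : Int) (h0 : 0 ≤ v) (h1 : v < 4294967296) :
    (getLandSlot v = some 9 ∨ getLandSlot v = some 11) ↔ (94 ≤ v / 65536 / 656 ∧ v / 65536 / 656 ≠ 98) := by
  unfold getLandSlot
  dsimp only
  split_ifs <;>
    simp only [Option.some.injEq, or_self, false_iff, true_iff, true_or, or_true, not_and, not_not, ne_eq] <;>
    omega

-- rngOf is n-fold iteration of rngAdvance
theorem foldl_const_iterate (xs : List Int) (f : Int → Int) (s : Int) :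
    xs.foldl (fun p _ => f p) s = f^[xs.length] s := by
  induction xs generalizing s with
  | nil => rfl
  | cons x xs ih => simp [List.foldl, ih, Function.iterate_succ_apply]

theorem length_pyRange_zero (n : Int) : (PySem.List.pyRange 0 n 1).length = n.toNat := by
  by_cases h : n ≤ 0
  · have he : PySem.List.pyRange 0 n = [] := by simp [PySem.List.pyRange]; omega
    simp [he]; omega
  · have h2 : n = ((n.toNat : Nat) : Int) := by omega
    rw [h2, PySem.List.pyRange_zero_natCast]
    simp only [List.length_map, List.length_range]
    omega

theorem rngOf_eq_iterate (seed n : Int) : rngOf seed n = rngAdvance^[n.toNat] seed := by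
  unfold rngOf; rw [foldl_const_iterate, length_pyRange_zero]

-- iterates starting from a reduced state stay reduced
theorem iterate_reduced (n : Nat) : ∀ y : Int, 0 ≤ y → y < 4294967296 →
    rngAdvance^[n] y % 4294967296 = rngAdvance^[n] y := by
  induction n with
  | zero => intro y h0 h1; exact Int.emod_eq_of_lt h0 h1
  | succ n ih =>
    intro y h0 h1
    rw [Function.iterate_succ_apply]
    exact ih _ (adv_nonneg y) (adv_lt y)

theorem iterate_emod (n : Nat) (x : Int) :
    rngAdvance^[n] (x % 4294967296) = rngAdvance^[n] x % 4294967296 := by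
  cases n with
  | zero => rfl
  | succ n =>
    rw [Function.iterate_succ_apply, Function.iterate_succ_apply, adv_emod,
      iterate_reduced n _ (adv_nonneg x) (adv_lt x)]

-- binary powering computes the iterated affine map
theorem altAffLoop_spec (n : Nat) : ∀ a c sa sc x : Int,
    ((altAffLoop n a c sa sc).1 * x + (altAffLoop n a c sa sc).2) % 4294967296 =
      (fun y => (sa * y + sc) % 4294967296)^[n] ((a * x + c) % 4294967296) := by
  induction n using Nat.strong_induction_on with
  | _ n ih =>
    intro a c sa sc x
    by_cases hn : n = 0
    · subst hn; rw [altAffLoop]; simp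
    · rw [altAffLoop, if_neg hn]
      rw [ih (n / 2) (by omega)]
      have hsq : (fun y => ((sa * sa) % 4294967296 * y + (sa * sc + sc) % 4294967296) % 4294967296)
          = (fun y => (sa * y + sc) % 4294967296)^[2] := by
        funext y
        show ((sa * sa) % 4294967296 * y + (sa * sc + sc) % 4294967296) % 4294967296
          = (sa * ((sa * y + sc) % 4294967296) + sc) % 4294967296
        have hm1 : (sa * sa) % 4294967296 ≡ sa * sa [ZMOD 4294967296] := Int.emod_emod_of_dvd _ dvd_rfl
        have hm2 : (sa * sc + sc) % 4294967296 ≡ sa * sc + sc [ZMOD 4294967296] := Int.emod_emod_of_dvd _ dvd_rfl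
        have hm3 : sa * y + sc ≡ (sa * y + sc) % 4294967296 [ZMOD 4294967296] := (Int.emod_emod_of_dvd _ dvd_rfl).symm
        have l : ((sa * sa) % 4294967296 * y + (sa * sc + sc) % 4294967296) % 4294967296
            = ((sa * sa) * y + (sa * sc + sc)) % 4294967296 := (hm1.mul_right y).add hm2
        have r : (sa * (sa * y + sc) + sc) % 4294967296
            = (sa * ((sa * y + sc) % 4294967296) + sc) % 4294967296 := (hm3.mul_left sa).add_right sc
        rw [l, ← r]; ring_nf
      have hodd : ((if n % 2 = 1 then ((sa * a) % 4294967296, (sa * c + sc) % 4294967296) else (a, c)).1 * x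
            + (if n % 2 = 1 then ((sa * a) % 4294967296, (sa * c + sc) % 4294967296) else (a, c)).2) % 4294967296
          = (fun y => (sa * y + sc) % 4294967296)^[n % 2] ((a * x + c) % 4294967296) := by
        by_cases hp : n % 2 = 1
        · rw [if_pos hp, hp]
          show ((sa * a) % 4294967296 * x + (sa * c + sc) % 4294967296) % 4294967296
            = (fun y => (sa * y + sc) % 4294967296)^[1] ((a * x + c) % 4294967296)
          rw [Function.iterate_one]
          have hm1 : (sa * a) % 4294967296 ≡ sa * a [ZMOD 4294967296] := Int.emod_emod_of_dvd _ dvd_rfl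
          have hm2 : (sa * c + sc) % 4294967296 ≡ sa * c + sc [ZMOD 4294967296] := Int.emod_emod_of_dvd _ dvd_rfl
          have hm3 : a * x + c ≡ (a * x + c) % 4294967296 [ZMOD 4294967296] := (Int.emod_emod_of_dvd _ dvd_rfl).symm
          have l : ((sa * a) % 4294967296 * x + (sa * c + sc) % 4294967296) % 4294967296
              = ((sa * a) * x + (sa * c + sc)) % 4294967296 := (hm1.mul_right x).add hm2
          have r : (sa * (a * x + c) + sc) % 4294967296
              = (sa * ((a * x + c) % 4294967296) + sc) % 4294967296 := (hm3.mul_left sa).add_right sc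
          rw [l, ← r]; ring_nf
        · have hp0 : n % 2 = 0 := by omega
          rw [if_neg hp, hp0]; rfl
      rw [hodd, hsq, ← Function.iterate_mul, ← Function.iterate_add_apply]
      congr 1
      omega

theorem altSeedState_eq (seed n : Int) :
    altSeedState seed n = rngOf seed n % 4294967296 := by
  unfold altSeedState
  show ((altAffLoop (max n 0).toNat 1 0 1103515245 24691).1 * seed
      + (altAffLoop (max n 0).toNat 1 0 1103515245 24691).2) % 4294967296 = _
  rw [altAffLoop_spec]
  have hf : (fun y => (1103515245 * y + 24691) % 4294967296) = rngAdvance := rfl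
  rw [hf, rngOf_eq_iterate]
  have h1 : (1 * seed + 0) % 4294967296 = seed % 4294967296 := by ring_nf
  have h2 : (max n 0).toNat = n.toNat := by rw [Int.max_def]; split <;> omega
  rw [h1, h2, iterate_emod]

-- the per-frame scans agree when B's state is A's state reduced mod 2^32
theorem loop_eq (xs : List Int) : ∀ (rA : Int) (acc : List Int),
    altLoop xs (rA % 4294967296) acc = getLELoop xs rA acc := by
  induction xs with
  | nil => intro rA acc; rfl
  | cons x xs ih =>
    intro rA acc
    rw [altLoop, getLELoop]
    simp only [altAdv_eq, adv_emod, altIsRare_emod]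
    have hcond : (94 ≤ rngAdvance rA / 65536 / 656 ∧ rngAdvance rA / 65536 / 656 ≠ 98 ∧ altIsRare rA = true)
        ↔ ((getLandSlot (rngAdvance rA) = some 9 ∨ getLandSlot (rngAdvance rA) = some 11)
            ∧ checkItem rA = some 2) := by
      rw [← checkItem_rare, landslot_iff _ (adv_nonneg rA) (adv_lt rA)]
      tauto
    have hnext : ∀ acc' : List Int, altLoop xs (rngAdvance rA) acc' = getLELoop xs (rngAdvance rA) acc' := by
      intro acc'
      have h := ih (rngAdvance rA) acc'
      rwa [adv_self_emod] at h
    rw [if_congr hcond rfl rfl]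
    by_cases hs : getLandSlot (rngAdvance rA) = some 9 ∨ getLandSlot (rngAdvance rA) = some 11
    · by_cases hr : checkItem rA = some 2
      · rw [if_pos ⟨hs, hr⟩, if_neg (not_not_intro hs), if_pos hr]; exact hnext _
      · rw [if_neg (fun h => hr h.2), if_neg (not_not_intro hs), if_neg hr]; exact hnext _
    · rw [if_neg (fun h => hs h.1), if_pos hs]; exact hnext _

-- ===== VERDICT (by name: the statement is the Claim_ definition above) =====
theorem getLE_spec : Claim_equal_getLE := by
  intro seed start end_ _
  unfold Spec_getLE getLE getLE_alt
  rw [altSeedState_eq, loop_eq]
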